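-- pv_equiv track=rewrite | github.com/pypi-data/pypi-mirror-43 | packages/serafin/serafin-0.12.2.tar.gz/serafin-0.12.2/src/serafin/fieldspec.py | _splitfields
-- ===== SOURCE A (Python) =====
-- def _splitfields(string):
--     """
--     Split field list into separate fields. Takes into account nesting
--     specification (inside parenthesis) by ignoring commas inside it.
--
--     >>> fs = Fieldspec()
--     >>> fs._splitfields('one,two,three')
--     ['one', 'two', 'three']
--
--     >>> fs._splitfields('one(mem1,mem2),two,three')
--     ['one(mem1,mem2)', 'two', 'three']
--
--     """
--     fields = []
--     append = fields.append
--     start = 0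
--     numparen = 0
--
--     for i, ch in enumerate(string):
--         if ch == ',':
--             if i != start and numparen == 0:
--                 append(string[start:i])
--                 start = i + 1
--         elif ch == '(':
--             numparen += 1
--         elif ch == ')':
--             numparen -= 1
--
--     if numparen != 0:
--         raise ValueError("Unmatched parenthesis")
--
--     fields.append(string[start:])
--     return fields
-- ===== SOURCE B (Python) =====
-- def _splitfields(string):
--     # pass 1: collect depth-0 comma positions and the final paren depth
--     cuts = []
--     depth = 0
--     for i, ch in enumerate(string):
--         if ch == ',':
--             if depth == 0:
--                 cuts.append(i)
--         elif ch == '(':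
--             depth += 1
--         elif ch == ')':
--             depth -= 1
--     if depth != 0:
--         raise ValueError("Unmatched parenthesis")
--     # pass 2: assemble fields from the cut table
--     fields = []
--     start = 0
--     for i in cuts:
--         if i != start:
--             fields.append(string[start:i])
--             start = i + 1
--     fields.append(string[start:])
--     return fields
-- ===== Notes on version B (the rewrite author's own statement) =====
-- stated objective: alternative
-- what changed: Replaces A's single interleaved scan-and-slice loop by a two-pass decomposition: a first scan builds a table of depth-0 comma indices and the final depth (raising on unmatched parentheses up front), and a second pass walks that table to assemble the fields with the i != start merging rule.
import Mathlib
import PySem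

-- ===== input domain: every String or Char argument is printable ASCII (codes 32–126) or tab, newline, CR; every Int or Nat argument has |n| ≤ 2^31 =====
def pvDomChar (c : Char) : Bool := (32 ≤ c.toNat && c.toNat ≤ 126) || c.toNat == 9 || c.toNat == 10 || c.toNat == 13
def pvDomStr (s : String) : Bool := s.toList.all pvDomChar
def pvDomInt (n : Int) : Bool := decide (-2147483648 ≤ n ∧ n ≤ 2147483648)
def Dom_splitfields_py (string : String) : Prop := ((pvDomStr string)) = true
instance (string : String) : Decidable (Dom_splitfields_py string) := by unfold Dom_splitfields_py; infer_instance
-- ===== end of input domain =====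

-- B changes the decomposition (comma-index table built first, fields assembled second) with the same cost;
-- both Pythons raise ValueError on unmatched parentheses, which Pre_ excludes.

-- ===== PORT A =====
-- A's single fused loop: state (fields, start, numparen); a depth-0 comma at i ≠ start
-- emits string[start:i]; the final append of string[start:] happens after the raise check
-- (the raising inputs are excluded by Pre_ below, so the port just appends).
def pvStepA (cs : List Char) (st : List String × Int × Int) (p : Int × Char) : List String × Int × Int :=
  match st, p with
  | (fields, start, numparen), (i, ch) =>
    if ch = ',' then
      if i ≠ start ∧ numparen = 0 then
        (fields ++ [String.ofList (PySem.List.slice cs (some start) (some i))], i + 1, numparen)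
      else (fields, start, numparen)
    else if ch = '(' then (fields, start, numparen + 1)
    else if ch = ')' then (fields, start, numparen - 1)
    else (fields, start, numparen)

def splitfields_py (string : String) : List String :=
  let cs := string.toList
  let st := (PySem.List.enumerate cs).foldl (pvStepA cs) ([], 0, 0)
  st.1 ++ [String.ofList (PySem.List.slice cs (some st.2.1) none)]

-- ===== PORT B =====
-- pass 1: table of depth-0 comma indices plus the final depth
def pvStepB1 (st : List Int × Int) (p : Int × Char) : List Int × Int :=
  match st, p with
  | (cuts, depth), (i, ch) =>
    if ch = ',' then
      if depth = 0 then (cuts ++ [i], depth) else (cuts, depth)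
    else if ch = '(' then (cuts, depth + 1)
    else if ch = ')' then (cuts, depth - 1)
    else (cuts, depth)

-- pass 2: assemble fields from the cut table with the i ≠ start merging rule
def pvStepB2 (cs : List Char) (st : List String × Int) (i : Int) : List String × Int :=
  match st with
  | (fields, start) =>
    if i ≠ start then
      (fields ++ [String.ofList (PySem.List.slice cs (some start) (some i))], i + 1)
    else (fields, start)

def splitfields_py_alt (string : String) : List String :=
  let cs := string.toList
  let p1 := (PySem.List.enumerate cs).foldl pvStepB1 ([], 0)
  -- depth ≠ 0 raises ValueError in Source B; Pre_ excludes those inputs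
  let p2 := p1.1.foldl (pvStepB2 cs) ([], 0)
  p2.1 ++ [String.ofList (PySem.List.slice cs (some p2.2) none)]

-- ===== PRECONDITION & SPEC =====
-- Pre_ excludes exactly the inputs on which BOTH Pythons raise ValueError("Unmatched parenthesis"):
-- those whose final parenthesis depth (count '(' minus count ')') is nonzero.
def Pre_splitfields_py (string : String) : Prop :=
  string.toList.count '(' = string.toList.count ')'
instance (string : String) : Decidable (Pre_splitfields_py string) := by
  unfold Pre_splitfields_py; infer_instance
def pvWitness_splitfields_py : String := "one(mem1,mem2),two,three"

def Spec_splitfields_py (string : String) (out : List String) : Prop := out = splitfields_py_alt string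
instance (string : String) (out : List String) : Decidable (Spec_splitfields_py string out) := by unfold Spec_splitfields_py; infer_instance

-- ===== CLAIM (what is proved, stated in full; the proofs are below) =====
def Claim_equal_splitfields_py : Prop := ∀ (string : String), Dom_splitfields_py string → Pre_splitfields_py string → Spec_splitfields_py string (splitfields_py string)

-- ===== LEMMAS AND PROOFS =====

-- Invariant: running A's fused loop from a state whose (fields, start) component is the
-- assembly of a cut table `cuts` equals building the table further with B's pass 1 and
-- assembling afterwards; the depth components coincide.
theorem pvInv (cs : List Char) (l : List (Int × Char)) (cuts : List Int) (d : Int)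
    (F : List String × Int) :
    l.foldl (pvStepA cs) ((cuts.foldl (pvStepB2 cs) F).1, (cuts.foldl (pvStepB2 cs) F).2, d)
      = (((l.foldl pvStepB1 (cuts, d)).1.foldl (pvStepB2 cs) F).1,
         ((l.foldl pvStepB1 (cuts, d)).1.foldl (pvStepB2 cs) F).2,
         (l.foldl pvStepB1 (cuts, d)).2) := by
  induction l generalizing cuts d with
  | nil => simp
  | cons p l ih =>
    obtain ⟨i, ch⟩ := p
    simp only [List.foldl_cons]
    by_cases hc : ch = ','
    · by_cases hd : d = 0
      · have hA : pvStepA cs ((cuts.foldl (pvStepB2 cs) F).1, (cuts.foldl (pvStepB2 cs) F).2, d) (i, ch)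
            = (((cuts ++ [i]).foldl (pvStepB2 cs) F).1, ((cuts ++ [i]).foldl (pvStepB2 cs) F).2, d) := by
          simp only [List.foldl_append, List.foldl_cons, List.foldl_nil]
          simp only [pvStepA, pvStepB2, hc, hd]
          by_cases hi : i ≠ (cuts.foldl (pvStepB2 cs) F).2 <;> simp [hi]
        rw [hA]
        have hB : pvStepB1 (cuts, d) (i, ch) = (cuts ++ [i], d) := by
          simp [pvStepB1, hc, hd]
        rw [hB, ih]
      · have hA : pvStepA cs ((cuts.foldl (pvStepB2 cs) F).1, (cuts.foldl (pvStepB2 cs) F).2, d) (i, ch)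
            = ((cuts.foldl (pvStepB2 cs) F).1, (cuts.foldl (pvStepB2 cs) F).2, d) := by
          simp [pvStepA, hc, hd]
        have hB : pvStepB1 (cuts, d) (i, ch) = (cuts, d) := by
          simp [pvStepB1, hc, hd]
        rw [hA, hB, ih]
    · by_cases ho : ch = '('
      · have hA : pvStepA cs ((cuts.foldl (pvStepB2 cs) F).1, (cuts.foldl (pvStepB2 cs) F).2, d) (i, ch)
            = ((cuts.foldl (pvStepB2 cs) F).1, (cuts.foldl (pvStepB2 cs) F).2, d + 1) := by
          simp [pvStepA, ho]
        have hB : pvStepB1 (cuts, d) (i, ch) = (cuts, d + 1) := by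
          simp [pvStepB1, ho]
        rw [hA, hB, ih]
      · by_cases hcl : ch = ')'
        · have hA : pvStepA cs ((cuts.foldl (pvStepB2 cs) F).1, (cuts.foldl (pvStepB2 cs) F).2, d) (i, ch)
              = ((cuts.foldl (pvStepB2 cs) F).1, (cuts.foldl (pvStepB2 cs) F).2, d - 1) := by
            simp [pvStepA, hcl]
          have hB : pvStepB1 (cuts, d) (i, ch) = (cuts, d - 1) := by
            simp [pvStepB1, hcl]
          rw [hA, hB, ih]
        · have hA : pvStepA cs ((cuts.foldl (pvStepB2 cs) F).1, (cuts.foldl (pvStepB2 cs) F).2, d) (i, ch)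
              = ((cuts.foldl (pvStepB2 cs) F).1, (cuts.foldl (pvStepB2 cs) F).2, d) := by
            simp [pvStepA, hc, ho, hcl]
          have hB : pvStepB1 (cuts, d) (i, ch) = (cuts, d) := by
            simp [pvStepB1, hc, ho, hcl]
          rw [hA, hB, ih]

-- ===== VERDICT (by name: the statement is the Claim_ definition above) =====
theorem splitfields_py_spec : Claim_equal_splitfields_py := by
  intro s _ _
  have h := pvInv s.toList (PySem.List.enumerate s.toList) [] 0 ([], 0)
  simp only [List.foldl_nil] at h
  simp only [Spec_splitfields_py, splitfields_py, splitfields_py_alt, h]
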